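-- pv_equiv track=rewrite | github.com/Gnome101/PSAT | workers/static_worker.py | _detect_src_dir
-- ===== SOURCE A (Python) =====
-- def _detect_src_dir(sources: dict[str, str]) -> str:
--     """Pick the foundry `src` directory based on where source files live.
--
--     Priority:
--       1. "src" if any file starts with src/
--       2. "contracts" if any file starts with contracts/
--       3. "." to catch files at root or under lib/
--     """
--     for path in sources:
--         if path.startswith("src/"):
--             return "src"
--     for path in sources:
--         if path.startswith("contracts/"):
--             return "contracts"
--     return "."
-- ===== SOURCE B (Python) =====
-- def _detect_src_dir(sources: dict[str, str]) -> str: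
--     found_contracts = False
--     for path in sources:
--         if path.startswith("src/"):
--             return "src"
--         if path.startswith("contracts/"):
--             found_contracts = True
--     return "contracts" if found_contracts else "."
-- ===== Notes on version B (the rewrite author's own statement) =====
-- stated objective: simpler
-- what changed: Merges A's two sequential scans over the keys into one pass carrying a found_contracts flag; 'src/' still short-circuits.
import Mathlib
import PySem

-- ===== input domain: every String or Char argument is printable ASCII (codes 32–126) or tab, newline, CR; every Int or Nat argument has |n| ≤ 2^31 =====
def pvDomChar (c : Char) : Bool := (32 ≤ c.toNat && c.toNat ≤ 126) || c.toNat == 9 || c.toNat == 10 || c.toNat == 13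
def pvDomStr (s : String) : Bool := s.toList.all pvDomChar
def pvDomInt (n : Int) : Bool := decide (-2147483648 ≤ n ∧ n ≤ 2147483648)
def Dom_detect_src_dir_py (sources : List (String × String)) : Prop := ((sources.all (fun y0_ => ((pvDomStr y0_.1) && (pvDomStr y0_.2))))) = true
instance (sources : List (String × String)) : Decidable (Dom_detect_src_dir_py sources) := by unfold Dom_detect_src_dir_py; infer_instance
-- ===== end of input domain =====

-- B merges A's two scans into a single pass carrying a found_contracts flag (objective: simpler).
-- ===== PORT A =====
def detect_src_dir_py (sources : List (String × String)) : String :=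
  match sources.find? (fun kv => PySem.Str.startswith kv.1 "src/") with
  | some _ => "src"
  | none =>
    match sources.find? (fun kv => PySem.Str.startswith kv.1 "contracts/") with
    | some _ => "contracts"
    | none => "."

-- ===== PORT B =====
def detectAltLoop (sources : List (String × String)) (foundContracts : Bool) : String :=
  match sources with
  | [] => if foundContracts then "contracts" else "."
  | kv :: rest =>
    if PySem.Str.startswith kv.1 "src/" then "src"
    else detectAltLoop rest (foundContracts || PySem.Str.startswith kv.1 "contracts/")

def detect_src_dir_py_alt (sources : List (String × String)) : String :=
  detectAltLoop sources false

-- ===== PRECONDITION & SPEC =====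
def Spec_detect_src_dir_py (sources : List (String × String)) (out : String) : Prop := out = detect_src_dir_py_alt sources
instance (sources : List (String × String)) (out : String) : Decidable (Spec_detect_src_dir_py sources out) := by unfold Spec_detect_src_dir_py; infer_instance

-- ===== CLAIM (what is proved, stated in full; the proofs are below) =====
def Claim_equal_detect_src_dir_py : Prop := ∀ (sources : List (String × String)), Dom_detect_src_dir_py sources → Spec_detect_src_dir_py sources (detect_src_dir_py sources)

-- ===== LEMMAS AND PROOFS =====

-- ===== VERDICT (by name: the statement is the Claim_ definition above) =====
theorem detectA_eq_loop (sources : List (String × String)) (fc : Bool) :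
    detectAltLoop sources fc =
      (match sources.find? (fun kv => PySem.Str.startswith kv.1 "src/") with
       | some _ => "src"
       | none =>
         if fc || (sources.find? (fun kv => PySem.Str.startswith kv.1 "contracts/")).isSome
         then "contracts" else ".") := by
  induction sources generalizing fc with
  | nil => simp [detectAltLoop]
  | cons kv rest ih =>
    by_cases hs : PySem.Str.startswith kv.1 "src/" = true
    · simp only [detectAltLoop, List.find?, hs, if_pos]
    · by_cases hc : PySem.Str.startswith kv.1 "contracts/" = true <;>
        simp only [detectAltLoop, List.find?, hs, hc, ih, Bool.false_or, Bool.true_or,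
          Bool.or_assoc, if_neg, Bool.false_eq_true, not_false_eq_true, cond_true, cond_false]
      · cases List.find? (fun kv => PySem.Str.startswith kv.1 "src/") rest <;> simp

theorem detect_src_dir_py_spec : Claim_equal_detect_src_dir_py := by
  intro sources _
  unfold Spec_detect_src_dir_py detect_src_dir_py detect_src_dir_py_alt
  rw [detectA_eq_loop]
  cases h : sources.find? (fun kv => PySem.Str.startswith kv.1 "src/") <;>
    cases h2 : sources.find? (fun kv => PySem.Str.startswith kv.1 "contracts/") <;>
      simp [h2]
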